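-- pv_equiv track=rewrite | github.com/jagadeepbevara1525-cloud/Infosys-Project | services/recommendation_generator.py | _parse_recommendation_response
-- ===== SOURCE A (Python) =====
-- from typing import List, Optional, Tuple
--
-- def _parse_recommendation_response(response: str) -> Tuple[str, str]:
--     """
--     Parse LLaMA recommendation response.
--
--     Args:
--         response: Generated response
--
--     Returns:
--         Tuple of (description, rationale)
--     """
--     # Simple parsing - split on common markers
--     lines = response.strip().split('\n')
--
--     description_lines = []
--     rationale_lines = []
--     in_rationale = False
--
--     for line in lines:
--         line = line.strip()
--         if not line:
--             continue
--
--         if 'rationale' in line.lower() or 'reason' in line.lower():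
--             in_rationale = True
--             continue
--
--         if in_rationale:
--             rationale_lines.append(line)
--         else:
--             description_lines.append(line)
--
--     description = " ".join(description_lines) if description_lines else response[:200]
--     rationale = " ".join(rationale_lines) if rationale_lines else "See regulatory requirement"
--
--     return description, rationale
-- ===== SOURCE B (Python) =====
-- def _parse_recommendation_response(response: str):
--     """Split-point decomposition: find the first marker line, then slice."""
--     stripped = [l.strip() for l in response.strip().split('\n')]
--
--     def marker(l):
--         low = l.lower()
--         return 'rationale' in low or 'reason' in low
--
--     idx = next((i for i, l in enumerate(stripped) if marker(l)), None)
--     if idx is None: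
--         desc = [l for l in stripped if l]
--         rat = []
--     else:
--         desc = [l for l in stripped[:idx] if l]
--         rat = [l for l in stripped[idx + 1:] if l and not marker(l)]
--
--     description = " ".join(desc) if desc else response[:200]
--     rationale = " ".join(rat) if rat else "See regulatory requirement"
--     return description, rationale
-- ===== Notes on version B (the rewrite author's own statement) =====
-- stated objective: alternative
-- what changed: Replaces A's single stateful scan with an in_rationale flag by a split-point decomposition: find the index of the first marker line, then take filtered slices before and after it (whole-list filter when no marker exists); same O(n) cost.
import Mathlib
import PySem

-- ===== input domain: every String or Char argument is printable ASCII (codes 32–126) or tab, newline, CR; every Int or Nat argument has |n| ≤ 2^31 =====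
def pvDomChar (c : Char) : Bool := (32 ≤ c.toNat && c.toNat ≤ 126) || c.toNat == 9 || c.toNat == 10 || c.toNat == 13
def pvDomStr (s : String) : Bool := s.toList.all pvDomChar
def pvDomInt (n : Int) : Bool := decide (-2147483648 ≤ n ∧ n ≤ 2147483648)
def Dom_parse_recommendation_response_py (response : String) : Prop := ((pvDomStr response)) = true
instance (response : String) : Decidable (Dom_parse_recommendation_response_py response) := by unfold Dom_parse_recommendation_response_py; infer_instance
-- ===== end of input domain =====

-- B replaces A's stateful flag scan by a split-point decomposition (find first marker line, slice and filter); same cost, different structure.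

-- shared literal test: 'rationale' in line.lower() or 'reason' in line.lower()
def pvMarker (l : String) : Bool :=
  PySem.Str.isIn "rationale" (PySem.Str.lower l) || PySem.Str.isIn "reason" (PySem.Str.lower l)

-- ===== PORT A =====
-- A's for-loop over lines with accumulators description_lines / rationale_lines and the in_rationale flag
def pvLoopA : List String → List String → List String → Bool → List String × List String
  | [], d, r, _ => (d, r)
  | l :: ls, d, r, inR =>
    let l' := PySem.Str.strip l
    if l' = "" then pvLoopA ls d r inR
    else if pvMarker l' then pvLoopA ls d r true
    else if inR then pvLoopA ls d (r ++ [l']) inR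
    else pvLoopA ls (d ++ [l']) r inR

def parse_recommendation_response_py (response : String) : String × String :=
  -- split? with sep "\n" ≠ "" is always some; getD [] is unreachable
  let lines := (PySem.Str.split? (PySem.Str.strip response) "\n").getD []
  let dr := pvLoopA lines [] [] false
  (if dr.1 ≠ [] then PySem.Str.join " " dr.1 else PySem.Str.slice response none (some 200),
   if dr.2 ≠ [] then PySem.Str.join " " dr.2 else "See regulatory requirement")

-- ===== PORT B =====
-- description/rationale line lists from the split point (first marker line) of the stripped lines
def pvSplitB (stripped : List String) : List String × List String :=
  match stripped.findIdx? pvMarker with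
  | none => (stripped.filter (fun l => l != ""), [])
  | some i => ((stripped.take i).filter (fun l => l != ""),
               (stripped.drop (i + 1)).filter (fun l => l != "" && !pvMarker l))

def parse_recommendation_response_py_alt (response : String) : String × String :=
  let stripped := ((PySem.Str.split? (PySem.Str.strip response) "\n").getD []).map PySem.Str.strip
  let dr := pvSplitB stripped
  (if dr.1 ≠ [] then PySem.Str.join " " dr.1 else PySem.Str.slice response none (some 200),
   if dr.2 ≠ [] then PySem.Str.join " " dr.2 else "See regulatory requirement")

-- ===== PRECONDITION & SPEC =====
def Spec_parse_recommendation_response_py (response : String) (out : String × String) : Prop := out = parse_recommendation_response_py_alt response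
instance (response : String) (out : String × String) : Decidable (Spec_parse_recommendation_response_py response out) := by unfold Spec_parse_recommendation_response_py; infer_instance

-- ===== CLAIM (what is proved, stated in full; the proofs are below) =====
def Claim_equal_parse_recommendation_response_py : Prop := ∀ (response : String), Dom_parse_recommendation_response_py response → Spec_parse_recommendation_response_py response (parse_recommendation_response_py response)

-- ===== LEMMAS AND PROOFS =====

-- once the flag is set, A appends exactly the non-empty non-marker stripped lines to rationale_lines
theorem pvLoopA_true (ls : List String) : ∀ d r, pvLoopA ls d r true =
    (d, r ++ (ls.map PySem.Str.strip).filter (fun l => l != "" && !pvMarker l)) := by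
  induction ls with
  | nil => intro d r; simp [pvLoopA]
  | cons l ls ih =>
    intro d r
    simp only [pvLoopA, List.map_cons, List.filter_cons]
    by_cases h0 : PySem.Str.strip l = ""
    · simp [h0, ih]
    · by_cases hm : pvMarker (PySem.Str.strip l)
      · simp [h0, hm, ih]
      · simp [h0, hm, ih, List.append_assoc]

-- before the flag is set, A's loop computes exactly B's split-point decomposition
theorem pvLoopA_false (ls : List String) : ∀ d r, pvLoopA ls d r false =
    (d ++ (pvSplitB (ls.map PySem.Str.strip)).1, r ++ (pvSplitB (ls.map PySem.Str.strip)).2) := by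
  induction ls with
  | nil => intro d r; simp [pvLoopA, pvSplitB]
  | cons l ls ih =>
    intro d r
    simp only [pvLoopA, pvSplitB, List.map_cons, List.findIdx?_cons]
    by_cases hm : pvMarker (PySem.Str.strip l)
    · have h0 : ¬ PySem.Str.strip l = "" := by
        intro h; rw [h] at hm; exact absurd hm (by decide)
      simp [h0, hm, pvLoopA_true]
    · by_cases h0 : PySem.Str.strip l = ""
      · rw [if_pos h0, ih d r]
        have hm' : pvMarker "" = false := by decide
        simp only [pvSplitB, h0, List.findIdx?_cons, hm', Bool.false_eq_true, if_false]
        cases hfi : (ls.map PySem.Str.strip).findIdx? pvMarker with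
        | none => simp
        | some i => simp
      · rw [if_neg h0, if_neg (by simp [hm]), if_neg (by decide), ih (d ++ [PySem.Str.strip l]) r]
        simp only [pvSplitB, hm, Bool.false_eq_true, if_false]
        cases hfi : (ls.map PySem.Str.strip).findIdx? pvMarker with
        | none => simp [h0, List.append_assoc]
        | some i => simp [h0, List.append_assoc]

-- ===== VERDICT (by name: the statement is the Claim_ definition above) =====
theorem parse_recommendation_response_py_spec : Claim_equal_parse_recommendation_response_py := by
  intro response _
  unfold Spec_parse_recommendation_response_py
  unfold parse_recommendation_response_py parse_recommendation_response_py_alt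
  simp only [pvLoopA_false, List.nil_append]
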